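-- pv_equiv track=rewrite | github.com/boxianglin/Storage | Dynamic-Programming/AllConstruct.py | allconstructMemo
-- ===== SOURCE A (Python) =====
-- def allconstructMemo(target, wordBank):
--     memo = {}
--     def helper(target,wordBank):
--         if target in memo: return memo[target]
--         if target == "": return [[]]
--         result = []
--         for word in wordBank:
--             if len(target) >= len(word) and target[:len(word)] == word:
--                 suffix = target[len(word):]
--                 suffix_ways = helper(suffix, wordBank)
--                 target_ways = [way + [word] for way in suffix_ways]
--                 result.extend(target_ways)
--         memo[target] = result
--         return result
--     return helper(target,wordBank)
-- ===== SOURCE B (Python) =====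
-- def allconstructMemo(target, wordBank):
--     n = len(target)
--     ways = [None] * (n + 1)
--     ways[n] = [[]]
--     for i in range(n - 1, -1, -1):
--         acc = []
--         for word in wordBank:
--             if target.startswith(word, i):
--                 acc.extend(way + [word] for way in ways[i + len(word)])
--         ways[i] = acc
--     return ways[0]
-- ===== Notes on version B (the rewrite author's own statement) =====
-- stated objective: alternative
-- what changed: Replaced top-down memoized recursion with a bottom-up tabulation over suffix start positions (ways[n]=[[]], fill i descending, return ways[0]), which removes recursion and the memo dict entirely.
import Mathlib
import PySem

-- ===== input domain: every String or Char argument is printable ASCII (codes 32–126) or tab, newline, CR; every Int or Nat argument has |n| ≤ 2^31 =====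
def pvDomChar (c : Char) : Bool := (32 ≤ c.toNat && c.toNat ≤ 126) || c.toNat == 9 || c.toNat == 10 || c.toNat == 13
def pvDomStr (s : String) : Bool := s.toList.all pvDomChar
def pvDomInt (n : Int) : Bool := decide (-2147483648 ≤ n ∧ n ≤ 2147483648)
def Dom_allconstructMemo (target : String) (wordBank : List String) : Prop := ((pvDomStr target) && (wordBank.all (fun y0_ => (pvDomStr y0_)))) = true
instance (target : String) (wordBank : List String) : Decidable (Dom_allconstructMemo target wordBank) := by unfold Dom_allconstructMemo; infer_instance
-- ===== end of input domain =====

-- B replaces A's top-down memoized recursion by a bottom-up tabulation over suffix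
-- start positions (alternative decomposition; return values proved equal on Pre_).

-- ===== PORT A =====
-- A's recursion is on suffix strings; with an empty word in the bank and a nonempty
-- target it recurses forever (RecursionError), so the port carries a fuel counter
-- (target length + 1, always enough inside Pre_); the fuel-0 branch is unreachable
-- inside Pre_.
mutual
  def pvHelperA (wb : List String) (fuel : Nat)
      (memo : PySem.Dict (List Char) (List (List String))) (t : List Char) :
      List (List String) × PySem.Dict (List Char) (List (List String)) :=
    match fuel with
    | 0 => ([], memo)
    | f + 1 =>
      match memo.get? t with
      | some v => (v, memo)
      | none =>
        if t = [] then ([[]], memo)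
        else
          let p := pvLoopA wb f memo t wb []
          (p.1, p.2.insert t p.1)
  termination_by (fuel, 0)
  def pvLoopA (wb : List String) (f : Nat)
      (memo : PySem.Dict (List Char) (List (List String))) (t : List Char) :
      List String → List (List String) →
      List (List String) × PySem.Dict (List Char) (List (List String))
    | [], res => (res, memo)
    | w :: ws, res =>
      if w.toList.length ≤ t.length ∧ t.take w.toList.length = w.toList then
        let q := pvHelperA wb f memo (t.drop w.toList.length)
        pvLoopA wb f q.2 t ws (res ++ q.1.map (fun way => way ++ [w]))
      else
        pvLoopA wb f memo t ws res
  termination_by ws res => (f, ws.length + 1)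
end


def allconstructMemo (target : String) (wordBank : List String) : List (List String) :=
  (pvHelperA wordBank (target.toList.length + 1) PySem.Dict.empty target.toList).1

-- ===== PORT B =====
-- inner 'for word in wordBank' loop of Source B at start position i; tab holds the
-- already computed entries ways[i+1], …, ways[n], so ways[i + len w] = tab[len w - 1]
def pvStepB (tl : List Char) (wb : List String) (i : Nat)
    (tab : List (List (List String))) : List (List String) :=
  wb.foldl (fun acc w =>
    if w.toList.length ≤ tl.length - i ∧ (tl.drop i).take w.toList.length = w.toList then
      acc ++ (tab.getD (w.toList.length - 1) []).map (fun way => way ++ [w])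
    else acc) []

def pvGoB (tl : List Char) (wb : List String) (n : Nat) : Nat → List (List (List String))
  | 0 => [[[]]]
  | k + 1 => pvStepB tl wb (n - (k + 1)) (pvGoB tl wb n k) :: pvGoB tl wb n k


def allconstructMemo_alt (target : String) (wordBank : List String) : List (List String) :=
  let tl := target.toList
  (pvGoB tl wordBank tl.length tl.length).headD []

-- ===== PRECONDITION & SPEC =====
-- Pre_ excludes exactly the inputs on which A raises (RecursionError): an empty
-- string in wordBank together with a nonempty target makes A's helper recurse forever.
def Pre_allconstructMemo (target : String) (wordBank : List String) : Prop :=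
  target = "" ∨ "" ∉ wordBank
instance (target : String) (wordBank : List String) : Decidable (Pre_allconstructMemo target wordBank) := by unfold Pre_allconstructMemo; infer_instance

def pvWitness_allconstructMemo : String × List String :=
  ("abcdef", ["ab", "abc", "cd", "def", "abcd", "ef", "c"])

def Spec_allconstructMemo (target : String) (wordBank : List String) (out : List (List String)) : Prop := out = allconstructMemo_alt target wordBank
instance (target : String) (wordBank : List String) (out : List (List String)) : Decidable (Spec_allconstructMemo target wordBank out) := by unfold Spec_allconstructMemo; infer_instance

-- ===== CLAIM (what is proved, stated in full; the proofs are below) =====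
def Claim_equal_allconstructMemo : Prop := ∀ (target : String) (wordBank : List String), Dom_allconstructMemo target wordBank → Pre_allconstructMemo target wordBank → Spec_allconstructMemo target wordBank (allconstructMemo target wordBank)

-- ===== LEMMAS AND PROOFS =====

-- pure (memo-free) value of A's recursion, with the same fuel discipline
def pvP (wb : List String) : Nat → List Char → List (List String)
  | 0, _ => []
  | f + 1, t =>
    if t = [] then [[]]
    else wb.foldl (fun acc w =>
      if w.toList.length ≤ t.length ∧ t.take w.toList.length = w.toList then
        acc ++ (pvP wb f (t.drop w.toList.length)).map (fun way => way ++ [w])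
      else acc) []

def pvS (wb : List String) (t : List Char) : List (List String) := pvP wb (t.length + 1) t

lemma pvWord_pos (wb : List String) (hw : "" ∉ wb) (w : String) (hmem : w ∈ wb) :
    1 ≤ w.toList.length := by
  rcases Nat.eq_zero_or_pos w.toList.length with h | h
  · exact absurd (String.toList_eq_nil_iff.mp (List.length_eq_zero_iff.mp h) ▸ hmem) hw
  · exact h

lemma pvP_stable (wb : List String) (hw : "" ∉ wb) :
    ∀ f g t, t.length < f → t.length < g → pvP wb f t = pvP wb g t := by
  intro f
  induction f with
  | zero => intro g t h; omega
  | succ f ih =>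
    intro g t hf hg
    match g, hg with
    | g + 1, hg =>
    by_cases ht : t = []
    · simp [pvP, ht]
    · simp only [pvP, ht]
      apply PySem.List.foldl_congr_mem
      intro acc w hmem
      have hlw : 1 ≤ w.toList.length := pvWord_pos wb hw w hmem
      have htl : 1 ≤ t.length := by cases t with | nil => exact absurd rfl ht | cons a l => simp
      have hlen : w.toList.length = w.length := by simp
      split_ifs with hc
      · rw [ih g (List.drop w.toList.length t) (by simp; omega) (by simp; omega)]
      · rfl

lemma pvS_unfold (wb : List String) (hw : "" ∉ wb) (t : List Char) (ht : t ≠ []) :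
    pvS wb t = wb.foldl (fun acc w =>
      if w.toList.length ≤ t.length ∧ t.take w.toList.length = w.toList then
        acc ++ (pvS wb (t.drop w.toList.length)).map (fun way => way ++ [w])
      else acc) [] := by
  have hh : pvS wb t = pvP wb (t.length + 1) t := rfl
  rw [hh]
  simp only [pvP, ht]
  apply PySem.List.foldl_congr_mem
  intro acc w hmem
  have hlw : 1 ≤ w.toList.length := pvWord_pos wb hw w hmem
  have htl : 1 ≤ t.length := by cases t with | nil => exact absurd rfl ht | cons a l => simp
  by_cases hc : w.toList.length ≤ t.length ∧ List.take w.toList.length t = w.toList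
  · simp only [if_pos hc, pvS]
    rw [pvP_stable wb hw t.length ((List.drop w.toList.length t).length + 1)
      (List.drop w.toList.length t) ?h1 ?h2]
    case h1 => simp only [List.length_drop]; omega
    case h2 => omega
  · simp only [if_neg hc]

-- the memo invariant: every memoized entry is the pure value of its suffix
def pvInv (wb : List String) (memo : PySem.Dict (List Char) (List (List String))) : Prop :=
  ∀ s v, memo.get? s = some v → v = pvS wb s

lemma pvLoopA_spec (wb : List String) (hw : "" ∉ wb) (f : Nat) (t : List Char)
    (ht : t.length ≤ f)
    (IH : ∀ t' memo, pvInv wb memo → t'.length < f →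
       (pvHelperA wb f memo t').1 = pvS wb t' ∧ pvInv wb (pvHelperA wb f memo t').2) :
    ∀ ws : List String, (∀ w ∈ ws, w ∈ wb) → ∀ memo res, pvInv wb memo →
      (pvLoopA wb f memo t ws res).1 =
        ws.foldl (fun acc w =>
          if w.toList.length ≤ t.length ∧ t.take w.toList.length = w.toList then
            acc ++ (pvS wb (t.drop w.toList.length)).map (fun way => way ++ [w])
          else acc) res
      ∧ pvInv wb (pvLoopA wb f memo t ws res).2 := by
  intro ws
  induction ws with
  | nil =>
    intro _ memo res hm
    simp only [pvLoopA, List.foldl_nil]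
    exact ⟨trivial, hm⟩
  | cons w ws ihw =>
    intro hsub memo res hm
    have hwmem : w ∈ wb := hsub w List.mem_cons_self
    have hlw : 1 ≤ w.toList.length := pvWord_pos wb hw w hwmem
    simp only [pvLoopA, List.foldl_cons]
    by_cases hc : w.toList.length ≤ t.length ∧ t.take w.toList.length = w.toList
    · simp only [if_pos hc]
      obtain ⟨h1, h2⟩ := IH (t.drop w.toList.length) memo hm
        (by simp only [List.length_drop]; omega)
      rw [h1]
      exact ihw (fun x hx => hsub x (List.mem_cons_of_mem _ hx)) _ _ h2
    · simp only [if_neg hc]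
      exact ihw (fun x hx => hsub x (List.mem_cons_of_mem _ hx)) memo res hm

lemma pvHelperA_spec (wb : List String) (hw : "" ∉ wb) :
    ∀ f t memo, pvInv wb memo → t.length < f →
      (pvHelperA wb f memo t).1 = pvS wb t ∧ pvInv wb (pvHelperA wb f memo t).2 := by
  intro f
  induction f with
  | zero => intro t memo _ h; omega
  | succ f ih =>
    intro t memo hm hf
    rcases hmv : memo.get? t with _ | v
    · by_cases ht : t = []
      · subst ht
        simp only [pvHelperA, hmv]
        exact ⟨rfl, hm⟩
      · have hrw : pvHelperA wb (f + 1) memo t =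
            ((pvLoopA wb f memo t wb []).1,
             (pvLoopA wb f memo t wb []).2.insert t (pvLoopA wb f memo t wb []).1) := by
          simp only [pvHelperA, hmv, ht, if_false]
        obtain ⟨h1, h2⟩ := pvLoopA_spec wb hw f t (by omega)
          (fun t' memo' hm' hlen => ih t' memo' hm' hlen) wb (fun _ h => h) memo [] hm
        have hval : (pvLoopA wb f memo t wb []).1 = pvS wb t := by
          rw [h1, ← pvS_unfold wb hw t ht]
        rw [hrw]
        refine ⟨hval, ?_⟩
        intro s v hsv
        rw [PySem.Dict.get?_insert] at hsv
        by_cases hst : s = t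
        · subst hst
          rw [if_pos rfl] at hsv
          rw [← Option.some_inj.mp hsv, hval]
        · rw [if_neg hst] at hsv
          exact h2 s v hsv
    · have hrw : pvHelperA wb (f + 1) memo t = (v, memo) := by
        simp only [pvHelperA, hmv]
      rw [hrw]
      exact ⟨hm t v hmv, hm⟩


lemma pvGoB_spec (tl : List Char) (wb : List String) (hw : "" ∉ wb) :
    ∀ k, k ≤ tl.length →
      pvGoB tl wb tl.length k =
        (List.range (k + 1)).map (fun j => pvS wb (tl.drop (tl.length - k + j))) := by
  intro k
  induction k with
  | zero =>
    intro _
    have hr : List.range (0 + 1) = [0] := rfl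
    rw [hr]
    simp only [List.map_cons, List.map_nil, Nat.sub_zero, Nat.add_zero, List.drop_length]
    simp [pvGoB, pvS, pvP]
  | succ k ihk =>
    intro hk
    have hk' : k ≤ tl.length := by omega
    rw [pvGoB, ihk hk']
    have hr : List.range (k + 1 + 1) = 0 :: (List.range (k + 1)).map Nat.succ :=
      List.range_succ_eq_map
    rw [hr, List.map_cons, List.map_map]
    refine List.cons_eq_cons.mpr ⟨?_, ?_⟩
    -- head: the step at i = n - (k+1) computes pvS of the suffix starting there
    · simp only [Nat.add_zero]
      rw [pvS_unfold wb hw (tl.drop (tl.length - (k + 1)))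
        (by intro h; have := congrArg List.length h; simp at this; omega)]
      unfold pvStepB
      apply PySem.List.foldl_congr_mem
      intro acc w hmem
      have hlw : 1 ≤ w.toList.length := pvWord_pos wb hw w hmem
      have hlen : (tl.drop (tl.length - (k + 1))).length = k + 1 := by simp; omega
      rw [hlen]
      by_cases hc : w.toList.length ≤ k + 1 ∧
          (tl.drop (tl.length - (k + 1))).take w.toList.length = w.toList
      · have hc' : w.toList.length ≤ tl.length - (tl.length - (k + 1)) ∧
            (tl.drop (tl.length - (k + 1))).take w.toList.length = w.toList := by
          exact ⟨by omega, hc.2⟩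
        rw [if_pos hc', if_pos hc]
        have hgd : ((List.range (k + 1)).map
              (fun j => pvS wb (tl.drop (tl.length - k + j)))).getD (w.toList.length - 1) []
            = pvS wb (tl.drop (tl.length - k + (w.toList.length - 1))) := by
          rw [List.getD_eq_getElem?_getD, List.getElem?_map,
            List.getElem?_range (by omega : w.toList.length - 1 < k + 1)]
          rfl
        rw [hgd, List.drop_drop]
        have harith : tl.length - (k + 1) + w.toList.length
            = tl.length - k + (w.toList.length - 1) := by omega
        rw [harith]
      · have hc' : ¬ (w.toList.length ≤ tl.length - (tl.length - (k + 1)) ∧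
            (tl.drop (tl.length - (k + 1))).take w.toList.length = w.toList) := by
          intro h
          exact hc ⟨by omega, h.2⟩
        rw [if_neg hc', if_neg hc]
    -- tail: reindex the table entries
    · apply List.map_congr_left
      intro j _
      have harith : tl.length - (k + 1) + (j + 1) = tl.length - k + j := by omega
      simp only [Function.comp, Nat.succ_eq_add_one, harith]

lemma pv_main (target : String) (wb : List String) (hpre : target = "" ∨ "" ∉ wb) :
    allconstructMemo target wb = allconstructMemo_alt target wb := by
  by_cases hw : "" ∈ wb
  · have ht : target = "" := by
      rcases hpre with h | h
      · exact h
      · exact absurd hw h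
    subst ht
    have h1 : pvHelperA wb ((("" : String).toList).length + 1) PySem.Dict.empty
        ("" : String).toList = ([[]], PySem.Dict.empty) := by
      simp [pvHelperA, PySem.Dict.get?_empty]
    simp only [allconstructMemo, allconstructMemo_alt, h1]
    rfl
  · obtain ⟨h1, _⟩ := pvHelperA_spec wb hw (target.toList.length + 1) target.toList
      PySem.Dict.empty
      (fun s v h => by rw [PySem.Dict.get?_empty] at h; cases h) (by omega)
    have h2 : allconstructMemo_alt target wb = pvS wb target.toList := by
      simp only [allconstructMemo_alt]
      rw [pvGoB_spec target.toList wb hw target.toList.length le_rfl]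
      rw [List.range_succ_eq_map, List.map_cons, List.headD_cons]
      simp
    rw [allconstructMemo, h1, h2]

-- ===== VERDICT (by name: the statement is the Claim_ definition above) =====
theorem allconstructMemo_spec : Claim_equal_allconstructMemo := by
  intro target wordBank _ hpre
  unfold Spec_allconstructMemo
  exact pv_main target wordBank hpre
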